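-- pv_equiv track=rewrite | github.com/daniel-reich/turbo-robot | 68omQmgQEwv8558ZK_11.py | max_stats
-- ===== SOURCE A (Python) =====
-- def max_stats(character, gold):
--
--   class Character:
--
--     def __init__(self, ap, dp, sp, gold):
--       self.ap = ap
--       self.dp = dp
--       self.sp = sp
--       self.g = gold
--
--     def buy(self, lst, typ):
--
--       possibles = []
--       pid = {}
--
--       if typ == 'A':
--         for item in lst:
--           possibles.append(self.ap + item.p)
--           pid[self.ap + item.p] = item.cost
--
--       elif typ == 'D':
--         for item in lst:
--           possibles.append(self.dp + item.p)
--           pid[self.dp + item.p] = item.cost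
--
--       elif typ == 'S':
--         for item in lst:
--           possibles.append(self.sp + item.p)
--           pid[self.sp + item.p] = item.cost
--
--       possibles = list(reversed(sorted(possibles)))
--
--       for possible in possibles:
--         price = pid[possible]
--         if self.g - price >= 0:
--           return possible
--
--   class Item:
--
--     def __init__(self, p, price):
--       self.p = p
--       self.cost = price
--
--   #Create each character!
--   knight = Character(120, 140, 6, gold)
--   warrior = Character(180, 71, 8, gold)
--   fairy = Character(71, 100, 16, gold)
--   robot = Character(160, 120, 11, gold)
--   giant = Character(160, 200, 4, gold)
--
--   #Store each character!
--   characters = {'Knight': knight, 'Warrior': warrior, 'Fairy': fairy, 'Robot': robot, 'Giant': giant}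
--
--   #Create each item!
--
--   #Weapons
--   simp_sword = Item(10, 20)
--   katana = Item(20, 40)
--   sharp_sword = Item(30, 60)
--   great_sword = Item(40, 80)
--   forg_sword = Item(50, 100)
--
--   #Store by type!
--   weapons = [simp_sword, katana, sharp_sword, great_sword, forg_sword]
--
--   #Armour
--   bronze = Item(20, 30)
--   iron = Item(40, 60)
--   steel = Item(60, 90)
--   obsid = Item(80, 120)
--   dragon = Item(100, 150)
--
--   #Store by type!
--   armour = [bronze, iron, steel, obsid, dragon]
--
--   #Boots
--   simple = Item(3, 24)
--   leather = Item(6, 48)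
--   strong = Item(9, 72)
--   compound = Item(12, 96)
--   soft = Item(15, 120)
--
--   #Store by type!
--   boots = [simple, leather, strong, compound, soft]
--
--   #Finds the correct character!
--   cor_character = characters[character]
--
--   #def buy(self, lst, typ):
--   attck_points = cor_character.buy(weapons, 'A')
--   defense_points = cor_character.buy(armour, 'D')
--   speed_points = cor_character.buy(boots, 'S')
--
--   return [attck_points, defense_points, speed_points]
-- ===== SOURCE B (Python) =====
-- def max_stats(character, gold):
--     chars = {'Knight': (120, 140, 6), 'Warrior': (180, 71, 8),
--              'Fairy': (71, 100, 16), 'Robot': (160, 120, 11),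
--              'Giant': (160, 200, 4)}
--     ap, dp, sp = chars[character]
--     weapons = [(10, 20), (20, 40), (30, 60), (40, 80), (50, 100)]
--     armour = [(20, 30), (40, 60), (60, 90), (80, 120), (100, 150)]
--     boots = [(3, 24), (6, 48), (9, 72), (12, 96), (15, 120)]
--     return [max((base + p for p, c in items if c <= gold), default=None)
--             for base, items in ((ap, weapons), (dp, armour), (sp, boots))]
-- ===== Notes on version B (the rewrite author's own statement) =====
-- stated objective: simpler
-- what changed: A builds a power-to-cost dict per item group, sorts the boosted powers descending and scans for the first affordable one; B keeps the characters as a name-to-stats dict and computes each stat directly as a single filtered max over (power, cost) tuples with default None.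
import Mathlib
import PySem

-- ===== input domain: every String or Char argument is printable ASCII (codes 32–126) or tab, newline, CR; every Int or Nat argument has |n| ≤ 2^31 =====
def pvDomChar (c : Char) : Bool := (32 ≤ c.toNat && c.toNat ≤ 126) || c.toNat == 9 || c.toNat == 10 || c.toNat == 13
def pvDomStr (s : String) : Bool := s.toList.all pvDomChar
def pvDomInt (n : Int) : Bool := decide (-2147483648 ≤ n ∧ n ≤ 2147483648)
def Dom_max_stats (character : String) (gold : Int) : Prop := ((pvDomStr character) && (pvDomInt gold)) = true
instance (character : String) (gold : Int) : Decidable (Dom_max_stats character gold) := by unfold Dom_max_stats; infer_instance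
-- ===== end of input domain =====

-- B replaces A's build-dict + sort-descending + first-affordable scan by a single
-- filtered max per item group (simpler); return-value equivalence on the five known names.

-- ===== PORT A =====
structure PyChar where
  ap : Int
  dp : Int
  sp : Int
  g : Int
deriving Repr, DecidableEq

structure PyItem where
  p : Int
  cost : Int
deriving Repr, DecidableEq

-- the 'for possible in possibles' loop of Character.buy (missing key = KeyError, unreachable here)
def pyBuyLoop (g : Int) (pid : PySem.Dict Int Int) : List Int → Option Int
  | [] => none
  | possible :: rest =>
    match pid.get? possible with
    | some price => if g - price ≥ 0 then some possible else pyBuyLoop g pid rest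
    | none => none

-- Character.buy: accumulate possibles and the power→cost dict, sort descending, scan
def pyBuy (self : PyChar) (lst : List PyItem) (typ : String) : Option Int :=
  let st : List Int × PySem.Dict Int Int :=
    if typ = "A" then
      lst.foldl (fun acc item => (acc.1 ++ [self.ap + item.p], acc.2.insert (self.ap + item.p) item.cost)) ([], PySem.Dict.empty)
    else if typ = "D" then
      lst.foldl (fun acc item => (acc.1 ++ [self.dp + item.p], acc.2.insert (self.dp + item.p) item.cost)) ([], PySem.Dict.empty)
    else if typ = "S" then
      lst.foldl (fun acc item => (acc.1 ++ [self.sp + item.p], acc.2.insert (self.sp + item.p) item.cost)) ([], PySem.Dict.empty)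
    else ([], PySem.Dict.empty)
  let possibles := (PySem.List.sorted st.1 (fun x => x) false).reverse
  pyBuyLoop self.g st.2 possibles

def max_stats (character : String) (gold : Int) : List (Option Int) :=
  let knight : PyChar := ⟨120, 140, 6, gold⟩
  let warrior : PyChar := ⟨180, 71, 8, gold⟩
  let fairy : PyChar := ⟨71, 100, 16, gold⟩
  let robot : PyChar := ⟨160, 120, 11, gold⟩
  let giant : PyChar := ⟨160, 200, 4, gold⟩
  let characters : PySem.Dict String PyChar :=
    PySem.Dict.ofList [("Knight", knight), ("Warrior", warrior), ("Fairy", fairy), ("Robot", robot), ("Giant", giant)]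
  let weapons : List PyItem := [⟨10, 20⟩, ⟨20, 40⟩, ⟨30, 60⟩, ⟨40, 80⟩, ⟨50, 100⟩]
  let armour : List PyItem := [⟨20, 30⟩, ⟨40, 60⟩, ⟨60, 90⟩, ⟨80, 120⟩, ⟨100, 150⟩]
  let boots : List PyItem := [⟨3, 24⟩, ⟨6, 48⟩, ⟨9, 72⟩, ⟨12, 96⟩, ⟨15, 120⟩]
  match characters.get? character with
  | none => []   -- KeyError in Python: excluded by Pre_max_stats
  | some c => [pyBuy c weapons "A", pyBuy c armour "D", pyBuy c boots "S"]

-- ===== PORT B =====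
-- max((base + p for p, c in items if c <= gold), default=None)
def altBest (base : Int) (gold : Int) (items : List (Int × Int)) : Option Int :=
  PySem.List.max? ((items.filter (fun pc => decide (pc.2 ≤ gold))).map (fun pc => base + pc.1)) (fun x => x)

def max_stats_alt (character : String) (gold : Int) : List (Option Int) :=
  let chars : PySem.Dict String (Int × Int × Int) :=
    PySem.Dict.ofList [("Knight", (120, 140, 6)), ("Warrior", (180, 71, 8)),
                       ("Fairy", (71, 100, 16)), ("Robot", (160, 120, 11)), ("Giant", (160, 200, 4))]
  let weapons : List (Int × Int) := [(10, 20), (20, 40), (30, 60), (40, 80), (50, 100)]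
  let armour : List (Int × Int) := [(20, 30), (40, 60), (60, 90), (80, 120), (100, 150)]
  let boots : List (Int × Int) := [(3, 24), (6, 48), (9, 72), (12, 96), (15, 120)]
  match chars.get? character with
  | none => []   -- KeyError in Python: excluded by Pre_max_stats
  | some (ap, dp, sp) => [altBest ap gold weapons, altBest dp gold armour, altBest sp gold boots]

-- ===== PRECONDITION & SPEC =====
-- Pre_ excludes unknown character names, on which both Pythons raise KeyError.
def Pre_max_stats (character : String) (gold : Int) : Prop :=
  character ∈ (["Knight", "Warrior", "Fairy", "Robot", "Giant"] : List String)
instance (character : String) (gold : Int) : Decidable (Pre_max_stats character gold) := by unfold Pre_max_stats; infer_instance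

def pvWitness_max_stats : String × Int := ("Knight", 75)

def Spec_max_stats (character : String) (gold : Int) (out : List (Option Int)) : Prop := out = max_stats_alt character gold
instance (character : String) (gold : Int) (out : List (Option Int)) : Decidable (Spec_max_stats character gold out) := by unfold Spec_max_stats; infer_instance

-- ===== CLAIM (what is proved, stated in full; the proofs are below) =====
def Claim_equal_max_stats : Prop := ∀ (character : String) (gold : Int), Dom_max_stats character gold → Pre_max_stats character gold → Spec_max_stats character gold (max_stats character gold)

-- ===== LEMMAS AND PROOFS =====

lemma buyW (b d s g : Int) :
    pyBuy ⟨b, d, s, g⟩ [⟨10,20⟩,⟨20,40⟩,⟨30,60⟩,⟨40,80⟩,⟨50,100⟩] "A"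
      = altBest b g [(10,20),(20,40),(30,60),(40,80),(50,100)] := by
  unfold pyBuy
  norm_num [List.foldl]
  rw [show (PySem.List.sorted [b+10,b+20,b+30,b+40,b+50] (fun x => x)) = [b+10,b+20,b+30,b+40,b+50] from
    PySem.List.sorted_eq_self_of_pairwise _ (fun x => x) (by
      refine List.Pairwise.cons ?_ (List.Pairwise.cons ?_ (List.Pairwise.cons ?_
        (List.Pairwise.cons ?_ (List.pairwise_singleton _ _)))) <;>
        (intro a ha; fin_cases ha <;> simp))]
  simp only [List.reverse_cons, List.reverse_nil, List.nil_append, List.cons_append]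
  simp only [pyBuyLoop, PySem.Dict.get?_insert, add_right_inj]
  norm_num
  simp only [altBest, List.filter]
  by_cases h1 : (20:Int) ≤ g <;> by_cases h2 : (40:Int) ≤ g <;> by_cases h3 : (60:Int) ≤ g <;>
    by_cases h4 : (80:Int) ≤ g <;> by_cases h5 : (100:Int) ≤ g <;>
    simp [h1, h2, h3, h4, h5, PySem.List.max?]

lemma buyA (b d s g : Int) :
    pyBuy ⟨b, d, s, g⟩ [⟨20,30⟩,⟨40,60⟩,⟨60,90⟩,⟨80,120⟩,⟨100,150⟩] "D"
      = altBest d g [(20,30),(40,60),(60,90),(80,120),(100,150)] := by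
  unfold pyBuy
  norm_num [List.foldl]
  simp only [String.reduceEq, reduceIte]
  rw [show (PySem.List.sorted [d+20,d+40,d+60,d+80,d+100] (fun x => x)) = [d+20,d+40,d+60,d+80,d+100] from
    PySem.List.sorted_eq_self_of_pairwise _ (fun x => x) (by
      refine List.Pairwise.cons ?_ (List.Pairwise.cons ?_ (List.Pairwise.cons ?_
        (List.Pairwise.cons ?_ (List.pairwise_singleton _ _)))) <;>
        (intro a ha; fin_cases ha <;> simp))]
  simp only [List.reverse_cons, List.reverse_nil, List.nil_append, List.cons_append]
  simp only [pyBuyLoop, PySem.Dict.get?_insert, add_right_inj]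
  norm_num
  simp only [altBest, List.filter]
  by_cases h1 : (30:Int) ≤ g <;> by_cases h2 : (60:Int) ≤ g <;> by_cases h3 : (90:Int) ≤ g <;>
    by_cases h4 : (120:Int) ≤ g <;> by_cases h5 : (150:Int) ≤ g <;>
    simp [h1, h2, h3, h4, h5, PySem.List.max?]

lemma buyB (b d s g : Int) :
    pyBuy ⟨b, d, s, g⟩ [⟨3,24⟩,⟨6,48⟩,⟨9,72⟩,⟨12,96⟩,⟨15,120⟩] "S"
      = altBest s g [(3,24),(6,48),(9,72),(12,96),(15,120)] := by
  unfold pyBuy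
  norm_num [List.foldl]
  simp only [String.reduceEq, reduceIte]
  rw [show (PySem.List.sorted [s+3,s+6,s+9,s+12,s+15] (fun x => x)) = [s+3,s+6,s+9,s+12,s+15] from
    PySem.List.sorted_eq_self_of_pairwise _ (fun x => x) (by
      refine List.Pairwise.cons ?_ (List.Pairwise.cons ?_ (List.Pairwise.cons ?_
        (List.Pairwise.cons ?_ (List.pairwise_singleton _ _)))) <;>
        (intro a ha; fin_cases ha <;> simp))]
  simp only [List.reverse_cons, List.reverse_nil, List.nil_append, List.cons_append]
  simp only [pyBuyLoop, PySem.Dict.get?_insert, add_right_inj]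
  norm_num
  simp only [altBest, List.filter]
  by_cases h1 : (24:Int) ≤ g <;> by_cases h2 : (48:Int) ≤ g <;> by_cases h3 : (72:Int) ≤ g <;>
    by_cases h4 : (96:Int) ≤ g <;> by_cases h5 : (120:Int) ≤ g <;>
    simp [h1, h2, h3, h4, h5, PySem.List.max?]

lemma char_eq (ap dp sp g : Int) :
    [pyBuy ⟨ap, dp, sp, g⟩ [⟨10,20⟩,⟨20,40⟩,⟨30,60⟩,⟨40,80⟩,⟨50,100⟩] "A",
     pyBuy ⟨ap, dp, sp, g⟩ [⟨20,30⟩,⟨40,60⟩,⟨60,90⟩,⟨80,120⟩,⟨100,150⟩] "D",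
     pyBuy ⟨ap, dp, sp, g⟩ [⟨3,24⟩,⟨6,48⟩,⟨9,72⟩,⟨12,96⟩,⟨15,120⟩] "S"]
      = [altBest ap g [(10,20),(20,40),(30,60),(40,80),(50,100)],
         altBest dp g [(20,30),(40,60),(60,90),(80,120),(100,150)],
         altBest sp g [(3,24),(6,48),(9,72),(12,96),(15,120)]] := by
  rw [buyW, buyA, buyB]

-- ===== VERDICT (by name: the statement is the Claim_ definition above) =====
theorem max_stats_spec : Claim_equal_max_stats := by
  intro character gold _ hpre
  unfold Pre_max_stats at hpre
  unfold Spec_max_stats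
  simp only [List.mem_cons, List.not_mem_nil, or_false] at hpre
  rcases hpre with h | h | h | h | h <;> subst h <;> exact char_eq _ _ _ gold
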